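-- pv_equiv track=rewrite | github.com/cdog-gh/gh_coding_test | 7/10/gh_sol.py | build_pat_2_to_12
-- ===== SOURCE A (Python) =====
-- def build_pat_2_to_12(dat: list):
--     res = {
--         "Rapid": [],
--         "Normal": []
--     }
--     for i in range(2 ** len(dat)):
--         li = []
--         for j in range(len(dat)):
--             if i & (1 << j):
--                 li.append(dat[j][0])
--         if len(li) <= 2:
--             res["Rapid"].append(li)
--         elif li[-1] == "Mishima":
--             res["Rapid"].append(li)
--         elif "Shizuoka" not in li:
--             res["Rapid"].append(li)
--         else:
--             res["Normal"].append(li)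
--     return res
-- ===== SOURCE B (Python) =====
-- def build_pat_2_to_12(dat: list):
--     # Incremental power-set doubling instead of bitmask enumeration; same subset order.
--     subsets = [[]]
--     for row in dat:
--         x = row[0]
--         subsets = subsets + [s + [x] for s in subsets]
--     rapid = []
--     normal = []
--     for li in subsets:
--         if len(li) <= 2 or li[-1] == "Mishima" or "Shizuoka" not in li:
--             rapid.append(li)
--         else:
--             normal.append(li)
--     return {"Rapid": rapid, "Normal": normal}
-- ===== Notes on version B (the rewrite author's own statement) =====
-- stated objective: alternative
-- what changed: Replaces the bitmask enumeration (for each i in range(2**n), an inner loop over all n bit positions rebuilding each subset) by incremental power-set doubling (subsets = subsets + [s+[x] for s in subsets]) followed by a single classification pass that or-combines the three Rapid branches into one condition.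
-- outside the precondition, e.g. on build_pat_2_to_12([[]]): A raises IndexError, B raises IndexError
import Mathlib
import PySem

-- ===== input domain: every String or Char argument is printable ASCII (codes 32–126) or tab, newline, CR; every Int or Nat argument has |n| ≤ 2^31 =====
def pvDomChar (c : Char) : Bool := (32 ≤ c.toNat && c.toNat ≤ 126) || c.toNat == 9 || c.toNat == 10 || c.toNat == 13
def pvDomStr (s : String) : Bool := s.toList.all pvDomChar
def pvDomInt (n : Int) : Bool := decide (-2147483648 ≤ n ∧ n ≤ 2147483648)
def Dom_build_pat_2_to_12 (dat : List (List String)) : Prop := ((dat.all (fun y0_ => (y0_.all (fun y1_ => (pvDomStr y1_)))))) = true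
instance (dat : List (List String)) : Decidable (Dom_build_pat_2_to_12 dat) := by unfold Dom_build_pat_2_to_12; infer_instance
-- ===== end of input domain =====

-- B replaces A's bitmask power-set enumeration by incremental doubling plus one
-- classification pass with a single or-combined condition (objective: alternative).

-- ===== PORT A =====
-- literal port of the bitmask loop; dat[j][0] and li[-1] are taken with a default,
-- exact under Pre_ (rows nonempty, j in range, li nonempty when the branch is reached);
-- j.toNat and the Nat exponent are exact because range values are nonnegative
def build_pat_2_to_12 (dat : List (List String)) : List (String × List (List String)) :=
  let res0 : PySem.Dict String (List (List String)) :=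
    (PySem.Dict.empty.insert "Rapid" []).insert "Normal" []
  let res := (PySem.List.pyRange 0 ((2:Int) ^ dat.length) 1).foldl (fun res i =>
    let li : List String := (PySem.List.pyRange 0 (PySem.List.len dat) 1).foldl (fun li j =>
      if PySem.Int.band i ((1:Int) <<< j.toNat) ≠ 0 then
        li ++ [PySem.List.pyGetD (PySem.List.pyGetD dat j []) 0 ""]
      else li) []
    if li.length ≤ 2 then res.modify "Rapid" [] (· ++ [li])
    else if PySem.List.pyGetD li (-1) "" = "Mishima" then res.modify "Rapid" [] (· ++ [li])
    else if "Shizuoka" ∉ li then res.modify "Rapid" [] (· ++ [li])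
    else res.modify "Normal" [] (· ++ [li])) res0
  res.items

-- ===== PORT B =====
-- row[0], exact under Pre_ (rows nonempty)
def pvHead (row : List String) : String := PySem.List.pyGetD row 0 ""

-- the or-combined condition of Source B; li[-1] with a default, exact: it is only
-- reached (short-circuit ||) when li.length > 2
def pvIsRapid (li : List String) : Bool :=
  decide (li.length ≤ 2) || (PySem.List.pyGetD li (-1) "" == "Mishima") || !(li.contains "Shizuoka")

def build_pat_2_to_12_alt (dat : List (List String)) : List (String × List (List String)) :=
  let subsets := dat.foldl (fun acc row => acc ++ acc.map (fun s => s ++ [pvHead row])) [[]]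
  let rn := subsets.foldl
    (fun (p : List (List String) × List (List String)) li =>
      if pvIsRapid li then (p.1 ++ [li], p.2) else (p.1, p.2 ++ [li])) ([], [])
  [("Rapid", rn.1), ("Normal", rn.2)]

-- ===== PRECONDITION & SPEC =====
-- Pre_ excludes inputs with an empty inner list: there dat[j][0] raises IndexError
-- in A (and row[0] raises in B as well)
def Pre_build_pat_2_to_12 (dat : List (List String)) : Prop := ∀ row ∈ dat, row ≠ []
instance (dat : List (List String)) : Decidable (Pre_build_pat_2_to_12 dat) := by unfold Pre_build_pat_2_to_12; infer_instance

def pvWitness_build_pat_2_to_12 : List (List String) := [["Shizuoka"], ["Mishima"], ["Atami"]]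

def Spec_build_pat_2_to_12 (dat : List (List String)) (out : List (String × List (List String))) : Prop := out = build_pat_2_to_12_alt dat
instance (dat : List (List String)) (out : List (String × List (List String))) : Decidable (Spec_build_pat_2_to_12 dat out) := by unfold Spec_build_pat_2_to_12; infer_instance

-- ===== CLAIM (what is proved, stated in full; the proofs are below) =====
def Claim_equal_build_pat_2_to_12 : Prop := ∀ (dat : List (List String)), Dom_build_pat_2_to_12 dat → Pre_build_pat_2_to_12 dat → Spec_build_pat_2_to_12 dat (build_pat_2_to_12 dat)

-- ===== LEMMAS AND PROOFS =====

-- the i & (1 << j) test is the j-th bit of i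
theorem pv_band_bit (m k : Nat) :
    (PySem.Int.band (m : Int) ((1:Int) <<< ((k : Int))) ≠ 0) ↔ m.testBit k = true := by
  have h1 : ((1:Int) <<< ((k : Int))) = (((2 ^ k : Nat)) : Int) := by
    rw [Int.shiftLeft_eq_mul_pow]; push_cast; ring
  rw [h1, PySem.Int.band_natCast, Nat.and_two_pow]
  cases h : m.testBit k <;> simp_all

-- the subset built for mask m, as filter-then-map
def pvSub (dat : List (List String)) (m : Nat) : List String :=
  ((List.range dat.length).filter (fun k => m.testBit k)).map
    (fun k => PySem.List.pyGetD (dat.getD k []) 0 "")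

-- bitmask enumeration = incremental doubling (same order)
theorem pv_pow_eq (dat : List (List String)) :
    (List.range (2 ^ dat.length)).map (pvSub dat)
      = dat.foldl (fun acc row => acc ++ acc.map (fun s => s ++ [pvHead row])) [[]] := by
  induction dat using List.reverseRecOn with
  | nil => decide
  | append_singleton hs x ih =>
    rw [List.foldl_append]
    rw [← ih]
    have hlen : (hs ++ [x]).length = hs.length + 1 := by simp
    rw [hlen, pow_succ, mul_two, List.range_add, List.map_append]
    congr 1
    · -- masks below 2^n: bit n is clear, entries below n unchanged
      apply List.map_congr_left
      intro m hm
      simp only [List.mem_range] at hm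
      unfold pvSub
      rw [hlen, List.range_succ, List.filter_append]
      have hbit : m.testBit hs.length = false := Nat.testBit_lt_two_pow hm
      have hsing : List.filter (fun k => m.testBit k) [hs.length] = [] := by simp [hbit]
      rw [hsing, List.append_nil]
      apply List.map_congr_left
      intro k hk
      have hk' : k < hs.length := List.mem_range.mp (List.mem_of_mem_filter hk)
      congr 1
      simp [List.getD, List.getElem?_append_left hk']
    · -- masks 2^n + c: bit n set, subset = subset of c ++ [x]
      rw [List.map_map, List.map_map]
      apply List.map_congr_left
      intro c hc
      simp only [Function.comp_apply]
      simp only [List.mem_range] at hc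
      unfold pvSub
      rw [hlen, List.range_succ, List.filter_append]
      have hbn : (2 ^ hs.length + c).testBit hs.length = true := by
        rw [Nat.testBit_two_pow_add_eq, Nat.testBit_lt_two_pow hc]; rfl
      have hfilter : (List.range hs.length).filter (fun k => (2 ^ hs.length + c).testBit k)
          = (List.range hs.length).filter (fun k => c.testBit k) := by
        apply List.filter_congr
        intro k hk
        rw [Nat.testBit_two_pow_add_gt (List.mem_range.mp hk)]
      have hsing : List.filter (fun k => (2 ^ hs.length + c).testBit k) [hs.length]
          = [hs.length] := by simp [hbn]
      rw [hfilter, hsing, List.map_append]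
      congr 1
      · apply List.map_congr_left
        intro k hk
        have hk' : k < hs.length := List.mem_range.mp (List.mem_of_mem_filter hk)
        congr 1
        simp [List.getD, List.getElem?_append_left hk']
      · simp [List.getD, pvHead]

-- A's inner loop builds exactly pvSub dat m
theorem pv_inner_eq (dat : List (List String)) (m : Nat) :
    (PySem.List.pyRange 0 (PySem.List.len dat) 1).foldl (fun li j =>
        if PySem.Int.band (m : Int) ((1:Int) <<< j.toNat) ≠ 0 then
          li ++ [PySem.List.pyGetD (PySem.List.pyGetD dat j []) 0 ""]
        else li) []
      = pvSub dat m := by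
  rw [PySem.List.len_eq, PySem.List.pyRange_zero_natCast, List.foldl_map]
  refine Eq.trans (List.foldl_ext _ (fun li k =>
      if m.testBit k = true then
        li ++ [PySem.List.pyGetD (dat.getD k []) 0 ""] else li) [] ?_) ?_
  · intro li k _hk
    rw [Int.toNat_natCast, PySem.List.pyGetD_natCast]
    by_cases h : m.testBit k = true
    · rw [if_pos ((pv_band_bit m k).mpr h)]
      simp [h]
    · rw [if_neg (fun hb => h ((pv_band_bit m k).mp hb))]
      simp [h]
  · rw [PySem.List.foldl_append_if, List.nil_append]
    rfl

-- the two modify steps on the literal two-key dict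
theorem pv_mod_rapid (r ns : List (List String)) (f : List (List String) → List (List String)) :
    (PySem.Dict.mk [("Rapid", r), ("Normal", ns)]).modify "Rapid" [] f
      = PySem.Dict.mk [("Rapid", f r), ("Normal", ns)] := by
  simp [PySem.Dict.modify, PySem.Dict.insert, PySem.Dict.getD, PySem.Dict.get?]

theorem pv_mod_normal (r ns : List (List String)) (f : List (List String) → List (List String)) :
    (PySem.Dict.mk [("Rapid", r), ("Normal", ns)]).modify "Normal" [] f
      = PySem.Dict.mk [("Rapid", r), ("Normal", f ns)] := by
  simp [PySem.Dict.modify, PySem.Dict.insert, PySem.Dict.getD, PySem.Dict.get?]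

-- A's four-branch step is the pvIsRapid split
theorem pv_step_eq (d : PySem.Dict String (List (List String))) (li : List String) :
    (if li.length ≤ 2 then d.modify "Rapid" [] (· ++ [li])
     else if PySem.List.pyGetD li (-1) "" = "Mishima" then d.modify "Rapid" [] (· ++ [li])
     else if "Shizuoka" ∉ li then d.modify "Rapid" [] (· ++ [li])
     else d.modify "Normal" [] (· ++ [li]))
    = (if pvIsRapid li then d.modify "Rapid" [] (· ++ [li]) else d.modify "Normal" [] (· ++ [li])) := by
  by_cases h1 : li.length ≤ 2
  · simp [pvIsRapid, h1]
  · by_cases h2 : PySem.List.pyGetD li (-1) "" = "Mishima"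
    · simp [pvIsRapid, h1, h2]
    · by_cases h3 : "Shizuoka" ∈ li
      · simp [pvIsRapid, h1, h2, h3]
      · simp [pvIsRapid, h1, h2, h3]

-- dict-append loop invariant (A's classification pass, over the mask list)
theorem pv_dict_inv (σ : Nat → List String) (I : List Nat) :
    ∀ (r ns : List (List String)),
    I.foldl (fun res m =>
        if (σ m).length ≤ 2 then res.modify "Rapid" [] (· ++ [σ m])
        else if PySem.List.pyGetD (σ m) (-1) "" = "Mishima" then res.modify "Rapid" [] (· ++ [σ m])
        else if "Shizuoka" ∉ σ m then res.modify "Rapid" [] (· ++ [σ m])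
        else res.modify "Normal" [] (· ++ [σ m]))
      (PySem.Dict.mk [("Rapid", r), ("Normal", ns)])
    = PySem.Dict.mk [("Rapid", r ++ (I.map σ).filter pvIsRapid),
                     ("Normal", ns ++ (I.map σ).filter (fun li => !pvIsRapid li))] := by
  induction I with
  | nil => simp
  | cons m I ih =>
    intro r ns
    rw [List.foldl_cons, pv_step_eq]
    by_cases h : pvIsRapid (σ m)
    · rw [if_pos h, pv_mod_rapid, ih]
      simp [h]
    · rw [if_neg h, pv_mod_normal, ih]
      simp [h]

-- pair-append loop invariant (B's classification pass)
theorem pv_pair_inv (L : List (List String)) :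
    ∀ (r ns : List (List String)),
    L.foldl (fun (p : List (List String) × List (List String)) li =>
        if pvIsRapid li then (p.1 ++ [li], p.2) else (p.1, p.2 ++ [li])) (r, ns)
    = (r ++ L.filter pvIsRapid, ns ++ L.filter (fun li => !pvIsRapid li)) := by
  induction L with
  | nil => simp
  | cons li L ih =>
    intro r ns
    rw [List.foldl_cons]
    by_cases h : pvIsRapid li
    · rw [if_pos h, ih]
      simp [h]
    · rw [if_neg h, ih]
      simp [h]

-- ===== VERDICT (by name: the statement is the Claim_ definition above) =====
theorem build_pat_2_to_12_spec : Claim_equal_build_pat_2_to_12 := by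
  intro dat _hdom _hpre
  unfold Spec_build_pat_2_to_12 build_pat_2_to_12 build_pat_2_to_12_alt
  simp only []
  have hpow : ((2:Int) ^ dat.length) = (((2 ^ dat.length : Nat)) : Int) := by push_cast; ring
  rw [hpow, PySem.List.pyRange_zero_natCast, List.foldl_map]
  have hbody : (fun (res : PySem.Dict String (List (List String))) (m : Nat) =>
      (fun res (i : Int) =>
        let li : List String := (PySem.List.pyRange 0 (PySem.List.len dat) 1).foldl (fun li j =>
          if PySem.Int.band i ((1:Int) <<< j.toNat) ≠ 0 then
            li ++ [PySem.List.pyGetD (PySem.List.pyGetD dat j []) 0 ""]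
          else li) []
        if li.length ≤ 2 then res.modify "Rapid" [] (· ++ [li])
        else if PySem.List.pyGetD li (-1) "" = "Mishima" then res.modify "Rapid" [] (· ++ [li])
        else if "Shizuoka" ∉ li then res.modify "Rapid" [] (· ++ [li])
        else res.modify "Normal" [] (· ++ [li])) res ((m : Int)))
      = (fun res m =>
        if (pvSub dat m).length ≤ 2 then res.modify "Rapid" [] (· ++ [pvSub dat m])
        else if PySem.List.pyGetD (pvSub dat m) (-1) "" = "Mishima" then res.modify "Rapid" [] (· ++ [pvSub dat m])
        else if "Shizuoka" ∉ pvSub dat m then res.modify "Rapid" [] (· ++ [pvSub dat m])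
        else res.modify "Normal" [] (· ++ [pvSub dat m])) := by
    funext res m
    simp only [pv_inner_eq dat m]
  rw [hbody]
  have h0 : ((PySem.Dict.empty.insert "Rapid" ([] : List (List String))).insert "Normal" [])
      = PySem.Dict.mk [("Rapid", []), ("Normal", [])] := by decide
  rw [h0, pv_dict_inv (pvSub dat) (List.range (2 ^ dat.length)), pv_pow_eq, pv_pair_inv]
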